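-- pv_equiv track=rewrite | github.com/Boucanier/Convert-schedule-to-pdf | staffSchedule.py | clearStaff
-- ===== SOURCE A (Python) =====
-- def clearStaff(profList : list[str]) -> list[str] :
--     toRemove = []
--     toAdd = []
--     for i in range(len(profList)):
--         if ',' in profList[i] :
--             toRemove.append(profList[i])
--             tempProfList = profList[i].split(', ')
--             [toAdd.append(e) for e in tempProfList]
--     for e in toAdd :
--         if e not in profList :
--             profList.append(e)
--     for e in toRemove :
--         profList.remove(e)
--
--     return profList
-- ===== SOURCE B (Python) =====
-- def clearStaff(profList: list[str]) -> list[str]: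
--     # One pass: keep non-comma entries in order, collect fresh split names,
--     # then rebuild the list in place (same mutation as the original).
--     seen = set(profList)
--     result = []
--     additions = []
--     for x in profList:
--         if ',' in x:
--             for name in x.split(', '):
--                 if name not in seen:
--                     seen.add(name)
--                     additions.append(name)
--         else:
--             result.append(x)
--     result.extend(additions)
--     profList[:] = result
--     return profList
-- ===== Notes on version B (the rewrite author's own statement) =====
-- stated objective: simpler
-- what changed: Replaces A's three-phase mutate (collect removals/additions, conditional appends with repeated 'in profList' list scans, then list.remove for each comma entry) by a single pass that rebuilds the list: keep non-comma entries, append split names not already seen (a set seeded with the original entries), and write back with slice assignment; the whole .remove deletion phase disappears.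
import Mathlib
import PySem

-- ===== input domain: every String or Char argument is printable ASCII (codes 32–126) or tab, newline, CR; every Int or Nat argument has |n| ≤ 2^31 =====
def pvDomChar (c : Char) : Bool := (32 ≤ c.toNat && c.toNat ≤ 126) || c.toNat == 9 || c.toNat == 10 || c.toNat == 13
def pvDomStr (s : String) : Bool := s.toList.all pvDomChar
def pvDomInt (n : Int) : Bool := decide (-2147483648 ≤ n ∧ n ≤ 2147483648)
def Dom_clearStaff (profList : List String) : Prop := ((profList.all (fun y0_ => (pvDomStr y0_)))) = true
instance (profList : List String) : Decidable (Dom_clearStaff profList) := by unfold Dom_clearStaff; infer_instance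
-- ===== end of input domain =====

-- B rebuilds the list in one pass with a seen-set instead of A's append-then-remove phases (objective: simpler).
-- Both A and B mutate profList in place in Python (A by append/remove, B by slice assignment); the theorem is about the returned value.

-- ',' in s
def pvHasComma (s : String) : Bool := PySem.Str.isIn "," s
-- s.split(', ') — exact via Chars.splitOn since the separator is nonempty
def pvSplitCS (s : String) : List String := (PySem.Chars.splitOn s.toList (", ".toList)).map String.ofList

-- ===== PORT A =====
def clearStaff (profList : List String) : List String :=
  -- first loop builds (toRemove, toAdd)
  let acc := profList.foldl
    (fun (p : List String × List String) s =>
      if pvHasComma s then (p.1 ++ [s], p.2 ++ pvSplitCS s) else p) ([], [])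
  -- second loop: conditional appends
  let l1 := acc.2.foldl (fun l e => if l.contains e then l else l ++ [e]) profList
  -- third loop: profList.remove(e); remove? = none would be Python's ValueError,
  -- which never occurs here (every toRemove entry occurs in the list), so .getD [] is never taken
  (acc.1.foldl (fun st e => st.bind (fun l => PySem.List.remove? l e)) (some l1)).getD []

-- ===== PORT B =====
def clearStaff_alt (profList : List String) : List String :=
  -- one pass with state (seen, result, additions)
  let st := profList.foldl
    (fun (st : PySem.Set String × List String × List String) x =>
      if pvHasComma x then
        let p := (pvSplitCS x).foldl
          (fun (p : PySem.Set String × List String) name =>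
            if p.1.contains name then p else (p.1.add name, p.2 ++ [name]))
          (st.1, st.2.2)
        (p.1, st.2.1, p.2)
      else (st.1, st.2.1 ++ [x], st.2.2))
    (PySem.Set.ofList profList, ([], []))
  st.2.1 ++ st.2.2

-- ===== PRECONDITION & SPEC =====
def Spec_clearStaff (profList : List String) (out : List String) : Prop := out = clearStaff_alt profList
instance (profList : List String) (out : List String) : Decidable (Spec_clearStaff profList out) := by unfold Spec_clearStaff; infer_instance

-- ===== CLAIM (what is proved, stated in full; the proofs are below) =====
def Claim_equal_clearStaff : Prop := ∀ (profList : List String), Dom_clearStaff profList → Spec_clearStaff profList (clearStaff profList)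

-- ===== LEMMAS AND PROOFS =====

-- the canonical "new additions" fold both programs reduce to
def pvGStep (base : List String) (acc : List String) (e : String) : List String :=
  if (base ++ acc).contains e then acc else acc ++ [e]

theorem pvPairFold (l : List String) (r a : List String) :
    l.foldl (fun (p : List String × List String) s =>
        if pvHasComma s then (p.1 ++ [s], p.2 ++ pvSplitCS s) else p) (r, a)
      = (r ++ l.filter pvHasComma, a ++ (l.filter pvHasComma).flatMap pvSplitCS) := by
  induction l generalizing r a with
  | nil => simp
  | cons h t ih =>
    by_cases hc : pvHasComma h
    · simp [List.foldl_cons, hc, ih, List.append_assoc]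
    · simp [List.foldl_cons, hc, ih]

theorem pvAppendFold (ta : List String) (base acc : List String) :
    ta.foldl (fun l e => if l.contains e then l else l ++ [e]) (base ++ acc)
      = base ++ ta.foldl (pvGStep base) acc := by
  induction ta generalizing acc with
  | nil => rfl
  | cons e t ih =>
    simp only [List.foldl_cons, pvGStep]
    by_cases hc : (base ++ acc).contains e = true
    · rw [if_pos hc, if_pos hc]
      exact ih acc
    · rw [if_neg hc, if_neg hc, List.append_assoc]
      exact ih (acc ++ [e])

theorem pvAddsNotMem (ta : List String) (base acc : List String)
    (h : ∀ a ∈ acc, a ∉ base) : ∀ a ∈ ta.foldl (pvGStep base) acc, a ∉ base := by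
  induction ta generalizing acc with
  | nil => exact h
  | cons e t ih =>
    simp only [List.foldl_cons, pvGStep]
    by_cases hc : (base ++ acc).contains e = true
    · rw [if_pos hc]
      exact ih acc h
    · rw [if_neg hc]
      refine ih (acc ++ [e]) ?_
      intro a ha
      rcases List.mem_append.1 ha with h1 | h1
      · exact h a h1
      · simp only [List.mem_singleton] at h1
        subst h1
        intro hb
        exact hc (by simp [hb])

theorem pvFoldRemoveNone (rs : List String) :
    rs.foldl (fun st e => st.bind (fun l => PySem.List.remove? l e)) (none : Option (List String)) = none := by
  induction rs with
  | nil => rfl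
  | cons e t ih => simpa using ih

theorem pvRemoveConsNe (rs : List String) (h : String) (l : List String)
    (hne : ∀ r ∈ rs, r ≠ h) :
    rs.foldl (fun st e => st.bind (fun l => PySem.List.remove? l e)) (some (h :: l))
      = (rs.foldl (fun st e => st.bind (fun l => PySem.List.remove? l e)) (some l)).map (h :: ·) := by
  induction rs generalizing l with
  | nil => rfl
  | cons r t ih =>
    have hr : h ≠ r := fun he => (hne r (by simp)) he.symm
    simp only [List.foldl_cons, Option.bind_some]
    rw [PySem.List.remove?_cons_of_ne l hr]
    cases hl : PySem.List.remove? l r with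
    | none => simp [pvFoldRemoveNone]
    | some l' =>
      simp only [Option.map_some]
      exact ih l' (fun x hx => hne x (by simp [hx]))

theorem pvRemovePhase (l extra : List String) (h : ∀ a ∈ extra, a ∉ l) :
    (l.filter pvHasComma).foldl (fun st e => st.bind (fun l => PySem.List.remove? l e)) (some (l ++ extra))
      = some (l.filter (fun x => !pvHasComma x) ++ extra) := by
  induction l with
  | nil => simp
  | cons hd t ih =>
    have h' : ∀ a ∈ extra, a ∉ t := fun a ha hb => h a ha (by simp [hb])
    by_cases hc : pvHasComma hd
    · simp only [List.filter_cons, hc, if_pos, List.cons_append, List.foldl_cons,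
        Option.bind_some, PySem.List.remove?_cons_self]
      simpa using ih h'
    · have hfilter : List.filter pvHasComma (hd :: t) = List.filter pvHasComma t := by
        simp [hc]
      rw [hfilter, List.cons_append,
        pvRemoveConsNe _ hd (t ++ extra)
          (by
            intro r hrr he
            subst he
            exact hc (List.of_mem_filter hrr)),
        ih h']
      simp [hc]

theorem pvA_eq (profList : List String) :
    clearStaff profList
      = profList.filter (fun x => !pvHasComma x)
          ++ ((profList.filter pvHasComma).flatMap pvSplitCS).foldl (pvGStep profList) [] := by
  simp only [clearStaff]
  rw [pvPairFold]
  simp only [List.nil_append]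
  have happ := pvAppendFold ((profList.filter pvHasComma).flatMap pvSplitCS) profList []
  simp only [List.append_nil] at happ
  rw [happ, pvRemovePhase profList _ (pvAddsNotMem _ profList [] (by simp))]
  rfl

-- B-side: invariant of the seen-set
def pvInv (base : List String) (seen : PySem.Set String) (acc : List String) : Prop :=
  ∀ x, x ∈ seen ↔ x ∈ base ∨ x ∈ acc

theorem pvBinner (base : List String) (names : List String) (seen : PySem.Set String)
    (acc : List String) (hinv : pvInv base seen acc) :
    (names.foldl (fun (p : PySem.Set String × List String) name =>
        if p.1.contains name then p else (p.1.add name, p.2 ++ [name])) (seen, acc)).2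
      = names.foldl (pvGStep base) acc
    ∧ pvInv base
        (names.foldl (fun (p : PySem.Set String × List String) name =>
          if p.1.contains name then p else (p.1.add name, p.2 ++ [name])) (seen, acc)).1
        (names.foldl (pvGStep base) acc) := by
  induction names generalizing seen acc with
  | nil => exact ⟨rfl, hinv⟩
  | cons name t ih =>
    have hcontains : seen.contains name = (base ++ acc).contains name := by
      by_cases hm : name ∈ base ++ acc
      · have h1 : name ∈ seen := (hinv name).2 (List.mem_append.1 hm)
        simp [PySem.Set.contains_eq_listContains, h1, hm]
      · have h1 : name ∉ seen := fun hs => hm (List.mem_append.2 ((hinv name).1 hs))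
        simp [PySem.Set.contains_eq_listContains, h1, hm]
    simp only [List.foldl_cons, pvGStep, hcontains]
    by_cases hc : (base ++ acc).contains name = true
    · rw [if_pos hc, if_pos hc]
      exact ih seen acc hinv
    · rw [if_neg hc, if_neg hc]
      refine ih (seen.add name) (acc ++ [name]) ?_
      intro x
      simp only [PySem.Set.mem_add, List.mem_append, List.mem_singleton, hinv x]
      tauto

theorem pvBfold (base : List String) (l : List String) (seen : PySem.Set String)
    (res acc : List String) (hinv : pvInv base seen acc) :
    (l.foldl (fun (st : PySem.Set String × List String × List String) x =>
        if pvHasComma x then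
          let p := (pvSplitCS x).foldl
            (fun (p : PySem.Set String × List String) name =>
              if p.1.contains name then p else (p.1.add name, p.2 ++ [name]))
            (st.1, st.2.2)
          (p.1, st.2.1, p.2)
        else (st.1, st.2.1 ++ [x], st.2.2)) (seen, res, acc)).2
      = (res ++ l.filter (fun x => !pvHasComma x),
         ((l.filter pvHasComma).flatMap pvSplitCS).foldl (pvGStep base) acc) := by
  induction l generalizing seen res acc with
  | nil => simp
  | cons x t ih =>
    by_cases hc : pvHasComma x = true
    · obtain ⟨hval, hinv'⟩ := pvBinner base (pvSplitCS x) seen acc hinv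
      simp only [List.foldl_cons]
      rw [if_pos hc]
      rw [hval, ih _ _ _ hinv']
      simp [hc, List.foldl_append]
    · simp only [List.foldl_cons]
      rw [if_neg hc, ih _ _ _ hinv]
      simp [hc, List.append_assoc]

theorem pvB_eq (profList : List String) :
    clearStaff_alt profList
      = profList.filter (fun x => !pvHasComma x)
          ++ ((profList.filter pvHasComma).flatMap pvSplitCS).foldl (pvGStep profList) [] := by
  simp only [clearStaff_alt]
  rw [pvBfold profList profList (PySem.Set.ofList profList) [] []
      (by intro x; simp [PySem.Set.mem_ofList])]
  simp

-- ===== VERDICT (by name: the statement is the Claim_ definition above) =====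
theorem clearStaff_spec : Claim_equal_clearStaff := by
  intro profList _
  unfold Spec_clearStaff
  rw [pvA_eq, pvB_eq]
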